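-- pv_equiv track=rewrite | github.com/uol-feps-soc-comp3932-project-2425/synoptic-project-nwoodham72 | flik-foundation/bert/new_assigner.py | assign_developer
-- ===== SOURCE A (Python) =====
-- def assign_developer(predicted_tags, developers):
--     best_overlap = 0
--     best_assignees = {}
--     predicted_tags_set = set(predicted_tags)
--
--     # Iterate through developer skills
--     for dev, skills in developers.items():
--         overlap = predicted_tags_set & skills  # Matching skills
--         if len(overlap) > best_overlap:
--             best_overlap = len(overlap)
--             best_assignees = {dev: overlap}  # Reset with current best
--         elif len(overlap) == best_overlap and best_overlap > 0:
--             best_assignees[dev] = overlap  # Add if equal to best_overlap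
--
--     return best_assignees  # Return developer(s) with highest overlap of skills and bug themes
-- ===== SOURCE B (Python) =====
-- def assign_developer(predicted_tags, developers):
--     # Two-pass: build the overlap table first, then find the max and filter.
--     pset = set(predicted_tags)
--     overlaps = {dev: pset & skills for dev, skills in developers.items()}
--     best = max((len(o) for o in overlaps.values()), default=0)
--     if best == 0:
--         return {}
--     return {dev: o for dev, o in overlaps.items() if len(o) == best}
-- ===== Notes on version B (the rewrite author's own statement) =====
-- stated objective: alternative
-- what changed: Replaces A's single-pass running-max accumulation with conditional dict reset/append by a two-pass table-then-filter shape: build the full overlap table, take the max overlap size, and filter the table for it.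
import Mathlib
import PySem

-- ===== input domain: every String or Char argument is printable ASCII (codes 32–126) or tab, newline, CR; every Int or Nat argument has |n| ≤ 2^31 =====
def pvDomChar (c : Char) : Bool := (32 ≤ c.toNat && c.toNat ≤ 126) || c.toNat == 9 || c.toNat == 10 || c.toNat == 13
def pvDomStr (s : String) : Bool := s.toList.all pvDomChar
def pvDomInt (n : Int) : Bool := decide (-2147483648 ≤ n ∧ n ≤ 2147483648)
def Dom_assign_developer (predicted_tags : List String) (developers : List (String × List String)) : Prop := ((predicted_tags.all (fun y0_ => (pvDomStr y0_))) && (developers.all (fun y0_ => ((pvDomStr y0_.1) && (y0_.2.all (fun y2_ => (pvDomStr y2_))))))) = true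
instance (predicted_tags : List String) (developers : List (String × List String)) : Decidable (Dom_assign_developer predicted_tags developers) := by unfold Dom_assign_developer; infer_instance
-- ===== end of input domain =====

-- B replaces A's single-pass running-max accumulation by a two-pass table-then-filter
-- decomposition (alternative structure, same cost). Equivalence is about the return value.

-- ===== PORT A =====
-- the loop body of A: reset the dict on a strictly larger overlap,
-- insert on an equal positive one, otherwise keep the state
def pvStepA (pset : List String) (st : Int × PySem.Dict String (List String))
    (p : String × List String) : Int × PySem.Dict String (List String) :=
  let overlap := PySem.Set.inter pset p.2
  if st.1 < (overlap.length : Int) then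
    ((overlap.length : Int), PySem.Dict.insert PySem.Dict.empty p.1 overlap)
  else if (overlap.length : Int) = st.1 ∧ 0 < st.1 then
    (st.1, PySem.Dict.insert st.2 p.1 overlap)
  else st

-- literal transliteration of A: running (best_overlap, best_assignees) state
def assign_developer (predicted_tags : List String) (developers : List (String × List String)) : List (String × List String) :=
  let predicted_tags_set := PySem.Set.ofList predicted_tags
  let st := developers.foldl (pvStepA predicted_tags_set) (0, PySem.Dict.empty)
  st.2.items

-- ===== PORT B =====
-- literal transliteration of B: overlap table, max overlap size (default 0), filter
def assign_developer_alt (predicted_tags : List String) (developers : List (String × List String)) : List (String × List String) :=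
  let pset := PySem.Set.ofList predicted_tags
  let overlaps := developers.map (fun p => (p.1, PySem.Set.inter pset p.2))
  let best := (PySem.List.max? (overlaps.map (fun q : String × List String => ((q.2.length : Int)))) (fun x : Int => x)).getD 0
  if best = 0 then [] else overlaps.filter (fun q => (q.2.length : Int) == best)

-- ===== PRECONDITION & SPEC =====
-- Pre_ excludes developer lists with duplicate developer keys: the Python argument is a
-- dict, which cannot carry duplicate keys (they collapse before A runs), so behaviour on
-- such association lists is an accidental corner of the representation.
def Pre_assign_developer (predicted_tags : List String) (developers : List (String × List String)) : Prop :=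
  (developers.map Prod.fst).Nodup
instance (predicted_tags : List String) (developers : List (String × List String)) : Decidable (Pre_assign_developer predicted_tags developers) := by unfold Pre_assign_developer; infer_instance

def pvWitness_assign_developer : List String × (List (String × List String)) :=
  (["a", "b"], [("dave", ["a", "c"]), ("erin", ["b"])])

def Spec_assign_developer (predicted_tags : List String) (developers : List (String × List String)) (out : List (String × List String)) : Prop := out = assign_developer_alt predicted_tags developers
instance (predicted_tags : List String) (developers : List (String × List String)) (out : List (String × List String)) : Decidable (Spec_assign_developer predicted_tags developers out) := by unfold Spec_assign_developer; infer_instance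

-- ===== CLAIM (what is proved, stated in full; the proofs are below) =====
def Claim_equal_assign_developer : Prop := ∀ (predicted_tags : List String) (developers : List (String × List String)), Dom_assign_developer predicted_tags developers → Pre_assign_developer predicted_tags developers → Spec_assign_developer predicted_tags developers (assign_developer predicted_tags developers)

-- ===== LEMMAS AND PROOFS =====

-- size of the overlap of developer p with the tag set
def pvLen (pset : List String) (p : String × List String) : Int :=
  ((PySem.Set.inter pset p.2).length : Int)

-- maximum overlap size over a developer list (0 for the empty list)
def pvBest (pset : List String) : List (String × List String) → Int
  | [] => 0
  | p :: t => max (pvLen pset p) (pvBest pset t)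

-- overlap table restricted to the entries of size M
def pvFilt (pset : List String) (M : Int) (l : List (String × List String)) : List (String × List String) :=
  (l.map (fun p => (p.1, PySem.Set.inter pset p.2))).filter (fun q => (q.2.length : Int) == M)

lemma pvLen_nonneg (pset : List String) (p : String × List String) : 0 ≤ pvLen pset p := by
  simp [pvLen]

lemma pvBest_nonneg (pset : List String) (l : List (String × List String)) : 0 ≤ pvBest pset l := by
  induction l with
  | nil => simp [pvBest]
  | cons p t ih => simp only [pvBest]; omega

lemma pvBest_cons (pset : List String) (p : String × List String) (t : List (String × List String)) :
    pvBest pset (p :: t) = max (pvLen pset p) (pvBest pset t) := rfl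

lemma pvFilt_cons (pset : List String) (M : Int) (p : String × List String) (t : List (String × List String)) :
    pvFilt pset M (p :: t) =
      if pvLen pset p = M then (p.1, PySem.Set.inter pset p.2) :: pvFilt pset M t
      else pvFilt pset M t := by
  simp [pvFilt, pvLen, List.filter_cons]

lemma pvStepA_lt (pset : List String) (st : Int × PySem.Dict String (List String))
    (p : String × List String) (h : st.1 < pvLen pset p) :
    pvStepA pset st p = (pvLen pset p, PySem.Dict.insert PySem.Dict.empty p.1 (PySem.Set.inter pset p.2)) := by
  unfold pvStepA; rw [if_pos (by simpa [pvLen] using h)]; simp [pvLen]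

lemma pvStepA_eq (pset : List String) (st : Int × PySem.Dict String (List String))
    (p : String × List String) (h1 : ¬ st.1 < pvLen pset p) (h2 : pvLen pset p = st.1 ∧ 0 < st.1) :
    pvStepA pset st p = (st.1, PySem.Dict.insert st.2 p.1 (PySem.Set.inter pset p.2)) := by
  unfold pvStepA
  rw [if_neg (by simpa [pvLen] using h1), if_pos (by simpa [pvLen] using h2)]

lemma pvStepA_no (pset : List String) (st : Int × PySem.Dict String (List String))
    (p : String × List String) (h1 : ¬ st.1 < pvLen pset p) (h2 : ¬ (pvLen pset p = st.1 ∧ 0 < st.1)) :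
    pvStepA pset st p = st := by
  unfold pvStepA
  rw [if_neg (by simpa [pvLen] using h1), if_neg (by simpa [pvLen] using h2)]

lemma pv_empty_insert_items (k : String) (v : List String) :
    (PySem.Dict.insert PySem.Dict.empty k v).items = [(k, v)] := by
  rw [PySem.Dict.items_insert_of_not_contains _ _ (PySem.Dict.contains_empty k)]
  rfl

-- characterization of A's fold from an arbitrary state (b, d) with fresh keys ahead
lemma pv_fold_char (pset : List String) (l : List (String × List String))
    (b : Int) (d : PySem.Dict String (List String)) (hb : 0 ≤ b)
    (hdis : ∀ p ∈ l, d.contains p.1 = false) (hnd : (l.map Prod.fst).Nodup) :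
    (l.foldl (pvStepA pset) (b, d)).1 = max b (pvBest pset l)
    ∧ (l.foldl (pvStepA pset) (b, d)).2.items =
      (if b < pvBest pset l then pvFilt pset (pvBest pset l) l
       else if 0 < b then d.items ++ pvFilt pset b l
       else d.items) := by
  induction l generalizing b d with
  | nil =>
    refine ⟨by simp [pvBest]; omega, ?_⟩
    simp only [List.foldl_nil, pvBest, pvFilt, List.map_nil, List.filter_nil]
    rw [if_neg (by omega)]
    split_ifs <;> simp
  | cons p t ih =>
    have hk : 0 ≤ pvLen pset p := pvLen_nonneg pset p
    have hbt : 0 ≤ pvBest pset t := pvBest_nonneg pset t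
    have hdp : d.contains p.1 = false := hdis p List.mem_cons_self
    have hnd' : (p.1 :: t.map Prod.fst).Nodup := by simpa using hnd
    have hndt : (t.map Prod.fst).Nodup := (List.nodup_cons.mp hnd').2
    have hpt : ∀ q ∈ t, q.1 ≠ p.1 := by
      intro q hq h
      exact (List.nodup_cons.mp hnd').1 (h ▸ List.mem_map_of_mem hq)
    rw [List.foldl_cons]
    by_cases h1 : b < pvLen pset p
    · -- reset branch
      rw [pvStepA_lt pset _ p h1]
      have hdis' : ∀ q ∈ t, (PySem.Dict.insert PySem.Dict.empty p.1 (PySem.Set.inter pset p.2)).contains q.1 = false := by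
        intro q hq
        simp [PySem.Dict.contains_insert, PySem.Dict.contains_empty, hpt q hq]
      obtain ⟨ih1, ih2⟩ := ih (pvLen pset p) _ hk hdis' hndt
      refine ⟨by rw [ih1, pvBest_cons]; omega, ?_⟩
      rw [ih2, pvBest_cons, pv_empty_insert_items]
      rw [if_pos (by omega : b < max (pvLen pset p) (pvBest pset t))]
      by_cases h2 : pvLen pset p < pvBest pset t
      · rw [if_pos h2, max_eq_right (le_of_lt h2), pvFilt_cons, if_neg (by omega)]
      · rw [if_neg h2, if_pos (by omega : (0:Int) < pvLen pset p),
          max_eq_left (le_of_not_gt h2), pvFilt_cons, if_pos rfl]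
        rfl
    · by_cases h2 : pvLen pset p = b ∧ 0 < b
      · -- equal-to-best branch: insert appends (p.1 is a fresh key)
        rw [pvStepA_eq pset _ p h1 h2]
        have hdis' : ∀ q ∈ t, (PySem.Dict.insert d p.1 (PySem.Set.inter pset p.2)).contains q.1 = false := by
          intro q hq
          simp [PySem.Dict.contains_insert, hpt q hq, hdis q (List.mem_cons_of_mem p hq)]
        obtain ⟨ih1, ih2⟩ := ih b _ hb hdis' hndt
        refine ⟨by rw [ih1, pvBest_cons]; omega, ?_⟩
        rw [ih2, pvBest_cons,
          PySem.Dict.items_insert_of_not_contains _ _ hdp]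
        by_cases h3 : b < pvBest pset t
        · rw [if_pos h3, if_pos (by omega : b < max (pvLen pset p) (pvBest pset t)),
            max_eq_right (by omega), pvFilt_cons, if_neg (by omega)]
        · rw [if_neg h3, if_pos h2.2,
            if_neg (by omega : ¬ b < max (pvLen pset p) (pvBest pset t)),
            if_pos h2.2, pvFilt_cons, if_pos h2.1, List.append_assoc]
          rfl
      · -- no-op branch
        rw [pvStepA_no pset _ p h1 h2]
        obtain ⟨ih1, ih2⟩ := ih b d hb (fun q hq => hdis q (List.mem_cons_of_mem p hq)) hndt
        refine ⟨by rw [ih1, pvBest_cons]; omega, ?_⟩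
        rw [ih2, pvBest_cons]
        by_cases h3 : b < pvBest pset t
        · rw [if_pos h3, if_pos (by omega : b < max (pvLen pset p) (pvBest pset t)),
            max_eq_right (by omega), pvFilt_cons, if_neg (by omega)]
        · rw [if_neg h3, if_neg (by omega : ¬ b < max (pvLen pset p) (pvBest pset t))]
          by_cases h4 : 0 < b
          · rw [if_pos h4, if_pos h4, pvFilt_cons, if_neg (by omega)]
          · rw [if_neg h4, if_neg h4]

-- B's max-with-default over the overlap table equals pvBest
lemma pv_best_eq (pset : List String) (l : List (String × List String)) :
    (PySem.List.max? ((l.map (fun p : String × List String => (p.1, PySem.Set.inter pset p.2))).map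
        (fun q : String × List String => ((q.2.length : Int)))) (fun x : Int => x)).getD 0
      = pvBest pset l := by
  have haux : ∀ (s : List (String × List String)) (b : Int), 0 ≤ b →
      ((s.map (fun p : String × List String => (p.1, PySem.Set.inter pset p.2))).map
        (fun q : String × List String => ((q.2.length : Int)))).foldl max b = max b (pvBest pset s) := by
    intro s
    induction s with
    | nil => intro b hb; simp [pvBest]; omega
    | cons q s ih =>
      intro b hb
      have hq : 0 ≤ pvLen pset q := pvLen_nonneg pset q
      simp only [List.map_cons, List.foldl_cons]
      rw [ih _ (by simp [pvLen] at hq; omega)]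
      rw [pvBest_cons]
      simp only [pvLen] at hq ⊢
      omega
  cases l with
  | nil => rfl
  | cons p t =>
    simp only [List.map_cons, PySem.List.max?_id_cons, Option.getD_some]
    rw [haux t _ (by simpa [pvLen] using pvLen_nonneg pset p), pvBest_cons]
    rfl

-- ===== VERDICT (by name: the statement is the Claim_ definition above) =====
theorem assign_developer_spec : Claim_equal_assign_developer := by
  intro predicted_tags developers _hdom hpre
  unfold Spec_assign_developer
  simp only [assign_developer, assign_developer_alt]
  have hchar := pv_fold_char (PySem.Set.ofList predicted_tags) developers 0 PySem.Dict.empty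
    le_rfl (fun p _ => PySem.Dict.contains_empty p.1) hpre
  rw [hchar.2, pv_best_eq]
  have hb := pvBest_nonneg (PySem.Set.ofList predicted_tags) developers
  by_cases h : (0:Int) < pvBest (PySem.Set.ofList predicted_tags) developers
  · rw [if_pos h, if_neg (by omega : ¬ pvBest (PySem.Set.ofList predicted_tags) developers = 0)]
    rfl
  · rw [if_neg h, if_neg (by omega : ¬ (0:Int) < 0),
      if_pos (by omega : pvBest (PySem.Set.ofList predicted_tags) developers = 0)]
    rfl
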